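-- pv_equiv track=rewrite | github.com/maxiaowei0216/docker | utils/tag.py | generate_tag
-- ===== SOURCE A (Python) =====
-- def generate_tag(versions: list) -> str:
--     """
--     生成markdown格式的tag列表
--     :param versions: 形式为x.x.x的版本集合
--     :return: string
--     """
--
--     version_dict = {}
--     content = ''
--
--     for version in versions:
--         major_minor_version = ".".join(version.split(".")[:2])
--         if major_minor_version not in version_dict:
--             version_dict[major_minor_version] = []
--         version_dict[major_minor_version].append(version)
--
--     mm_versions = list(version_dict.keys())
--     mm_versions.sort(reverse=True)
--     for mm_ver in mm_versions:
--         full_vers = version_dict[mm_ver]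
--         full_vers.sort(reverse=True)
--         if mm_ver == mm_versions[0]:
--             content = f'- {full_vers[0]}, {mm_ver}, latest\n'
--         else:
--             content += f'- {full_vers[0]}, {mm_ver}\n'
--         for v in full_vers[1:]:
--             if not mm_ver == v:
--                 content += f'- {v}\n'
--     return content
-- ===== SOURCE B (Python) =====
-- def generate_tag(versions: list) -> str:
--     """One stable sort of (major.minor, version) pairs by key puts each group in a
--     contiguous run; collect the runs in a single pass, then render each run."""
--     def mm(v):
--         return ".".join(v.split(".")[:2])
--
--     ordered = sorted(((mm(v), v) for v in versions), key=lambda p: p[0], reverse=True)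
--     runs = []
--     for k, v in ordered:
--         if runs and runs[-1][0] == k:
--             runs[-1][1].append(v)
--         else:
--             runs.append((k, [v]))
--     out = ''
--     for i, (k, vs) in enumerate(runs):
--         group = sorted(vs, reverse=True)
--         out += f"- {group[0]}, {k}{', latest' if i == 0 else ''}\n"
--         out += ''.join(f"- {v}\n" for v in group[1:] if v != k)
--     return out
-- ===== Notes on version B (the rewrite author's own statement) =====
-- stated objective: alternative
-- what changed: Replaces A's dict-based grouping (build a dict of lists, sort its keys, then sort each stored group) by one stable sort of (major.minor, version) pairs by key, which makes every group a contiguous run; the runs are collected in a single pass and the first run is marked via enumerate.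
import Mathlib
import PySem

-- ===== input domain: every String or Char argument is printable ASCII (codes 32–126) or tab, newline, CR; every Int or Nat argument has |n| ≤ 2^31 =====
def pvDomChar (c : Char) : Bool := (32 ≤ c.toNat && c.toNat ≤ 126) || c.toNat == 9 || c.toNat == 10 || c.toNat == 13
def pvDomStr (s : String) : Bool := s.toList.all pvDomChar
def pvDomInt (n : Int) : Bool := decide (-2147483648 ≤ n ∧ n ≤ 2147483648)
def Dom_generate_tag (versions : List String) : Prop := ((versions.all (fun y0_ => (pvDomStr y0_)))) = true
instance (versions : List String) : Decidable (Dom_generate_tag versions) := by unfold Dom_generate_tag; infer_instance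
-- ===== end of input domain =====

-- B replaces A's dict-grouping (build a dict of lists, sort its keys, sort each group) by one
-- stable sort of (major.minor, version) pairs by key; the groups are then contiguous runs,
-- collected in a single pass and rendered with the first run marked 'latest'; same return value.

-- ===== PORT A =====
-- '.'.join(version.split('.')[:2]) — the major.minor key (identical expression in both Pythons)
def pvMM (v : String) : String :=
  PySem.Str.join "." (((PySem.Str.split? v ".").getD []).take 2)
  -- split? is none only for sep = ""; sep is ".", so getD [] never fires

-- version_dict after A's grouping loop ('if mm not in d: d[mm] = []; d[mm].append(version)'
-- is d[mm] = d.get(mm, []) + [version], i.e. Dict.modify)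
def pvDictA (versions : List String) : PySem.Dict String (List String) :=
  versions.foldl (fun d version => d.modify (pvMM version) [] (fun l => l ++ [version]))
    PySem.Dict.empty

-- full_vers[0] is (pyGet? … 0).getD "": the group of a key is never empty, the default never fires
def generate_tag (versions : List String) : String :=
  (PySem.List.sorted (pvDictA versions).keys (fun x => x) true).foldl (fun content mm_ver =>
    ((PySem.List.sorted ((pvDictA versions).getD mm_ver []) (fun x => x) true).drop 1).foldl
      (fun content v => if !(mm_ver == v) then content ++ ("- " ++ v ++ "\n") else content)
      (if mm_ver == (PySem.List.pyGet? (PySem.List.sorted (pvDictA versions).keys (fun x => x) true) 0).getD "" then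
        "- " ++ (PySem.List.pyGet? (PySem.List.sorted ((pvDictA versions).getD mm_ver []) (fun x => x) true) 0).getD "" ++ ", " ++ mm_ver ++ ", latest\n"
      else
        content ++ ("- " ++ (PySem.List.pyGet? (PySem.List.sorted ((pvDictA versions).getD mm_ver []) (fun x => x) true) 0).getD "" ++ ", " ++ mm_ver ++ "\n"))) ""

-- ===== PORT B =====
-- 'runs': the loop collecting the (key, [versions]) runs of the key-sorted pair list
-- (runs[-1][1].append(v) / runs.append(...) become last-element update / append)
def pvRuns (ordered : List (String × String)) : List (String × List String) :=
  ordered.foldl (fun runs kv =>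
    match runs.getLast? with
    | some last =>
      if last.1 == kv.1 then runs.dropLast ++ [(last.1, last.2 ++ [kv.2])]
      else runs ++ [(kv.1, [kv.2])]
    | none => [(kv.1, [kv.2])]) []

-- group[0] is (pyGet? … 0).getD "": a run is never empty, the default never fires
def generate_tag_alt (versions : List String) : String :=
  (PySem.List.enumerate (pvRuns
      (PySem.List.sorted (versions.map (fun v => (pvMM v, v))) (fun p => p.1) true))).foldl
    (fun out ir =>
      (out ++ ("- " ++ (PySem.List.pyGet? (PySem.List.sorted ir.2.2 (fun x => x) true) 0).getD "" ++ ", " ++ ir.2.1 ++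
        (if ir.1 == 0 then ", latest" else "") ++ "\n")) ++
      PySem.Str.join ""
        ((((PySem.List.sorted ir.2.2 (fun x => x) true).drop 1).filter (fun v => v != ir.2.1)).map (fun v => "- " ++ v ++ "\n"))) ""

-- ===== PRECONDITION & SPEC =====
def Spec_generate_tag (versions : List String) (out : String) : Prop := out = generate_tag_alt versions
instance (versions : List String) (out : String) : Decidable (Spec_generate_tag versions out) := by unfold Spec_generate_tag; infer_instance

-- ===== CLAIM (what is proved, stated in full; the proofs are below) =====
def Claim_equal_generate_tag : Prop := ∀ (versions : List String), Dom_generate_tag versions → Spec_generate_tag versions (generate_tag versions)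

-- ===== LEMMAS AND PROOFS =====

-- the reverse-sorted group of a key, and the output chunk one key contributes
def pvGroup (versions : List String) (k : String) : List String :=
  PySem.List.sorted (versions.filter (fun v => pvMM v == k)) (fun x => x) true

def pvChunk (versions : List String) (lat : Bool) (k : String) : String :=
  ("- " ++ (PySem.List.pyGet? (pvGroup versions k) 0).getD "" ++ ", " ++ k ++
      (if lat then ", latest" else "") ++ "\n") ++
    PySem.Str.join ""
      ((((pvGroup versions k).drop 1).filter (fun v => v != k)).map (fun v => "- " ++ v ++ "\n"))

-- canonical result: first key's chunk carries ', latest', the rest are concatenated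
def pvRender (versions : List String) : String :=
  match PySem.List.sorted (PySem.Set.ofList (versions.map pvMM)) (fun x => x) true with
  | [] => ""
  | k₀ :: rest => pvChunk versions true k₀ ++ PySem.Str.join "" (rest.map (pvChunk versions false))

theorem pv_join_empty_nil : PySem.Str.join "" ([] : List String) = "" := by
  simp [PySem.Str.join, PySem.Chars.join, List.intercalate]

theorem pv_join_empty_cons (s : String) (xs : List String) :
    PySem.Str.join "" (s :: xs) = s ++ PySem.Str.join "" xs := by
  simp [PySem.Str.join, PySem.Chars.join, List.intercalate]
  cases xs <;> simp [String.ofList_append]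

theorem pv_dict_getD (versions : List String) (k : String) :
    (pvDictA versions).getD k [] = versions.filter (fun v => pvMM v == k) := by
  have h := PySem.Dict.getD_foldl_modify_append
    (versions.map (fun v => (pvMM v, v))) (PySem.Dict.empty (κ := String) (ν := List String)) k
  rw [List.foldl_map] at h
  simpa [pvDictA, List.filter_map, Function.comp_def] using h

theorem pv_dict_keys (versions : List String) :
    (pvDictA versions).keys = PySem.Set.ofList (versions.map pvMM) := by
  have h := PySem.Dict.keys_foldl_modify_key versions pvMM ([] : List String)
    (fun _ version l => l ++ [version]) PySem.Dict.empty
  simpa [pvDictA, PySem.Set.update_nil_left] using h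

-- 'for v in tail: if not k == v: content += …' appends the joined filtered lines
theorem pv_string_fold_if (k : String) (l : List String) (c : String) :
    l.foldl (fun content v => if !(k == v) then content ++ ("- " ++ v ++ "\n") else content) c =
      c ++ PySem.Str.join "" ((l.filter (fun v => v != k)).map (fun v => "- " ++ v ++ "\n")) := by
  induction l generalizing c with
  | nil => simp [pv_join_empty_nil]
  | cons x xs ih =>
    have hc : (!(k == x)) = (x != k) := by
      simp [bne, BEq.comm]
    by_cases hx : (x != k) = true
    · rw [List.foldl_cons, hc, hx, if_pos rfl, ih]
      simp [hx, pv_join_empty_cons, String.append_assoc]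
    · have hx' : (x != k) = false := by simpa using hx
      rw [List.foldl_cons, hc, hx']
      simp only [Bool.false_eq_true, if_false, ih]
      simp [hx']

theorem pv_pyGet?_cons_zero {α : Type} (x : α) (l : List α) :
    PySem.List.pyGet? (x :: l) 0 = some x := by
  simp [PySem.List.pyGet?, PySem.List.pyIdx?]

theorem pv_lat : (", latest" : String) ++ "\n" = ", latest\n" := by decide

theorem pv_A_eq_render (versions : List String) : generate_tag versions = pvRender versions := by
  unfold generate_tag pvRender
  rw [pv_dict_keys]
  cases hK : PySem.List.sorted (PySem.Set.ofList (versions.map pvMM)) (fun x => x) true with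
  | nil => simp
  | cons k₀ rest =>
    have hnd : (k₀ :: rest).Nodup := by
      have h := (PySem.List.sorted_perm (PySem.Set.ofList (versions.map pvMM))
        (fun x : String => x) true).nodup_iff.mpr (PySem.Set.nodup_ofList _)
      rwa [hK] at h
    have hk₀ : k₀ ∉ rest := (List.nodup_cons.mp hnd).1
    simp only [List.foldl_cons]
    -- the first iteration produces the ', latest' chunk
    have h0 : ∀ c : String,
        ((PySem.List.sorted ((pvDictA versions).getD k₀ []) (fun x => x) true).drop 1).foldl
          (fun content v => if !(k₀ == v) then content ++ ("- " ++ v ++ "\n") else content)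
          (if k₀ == (PySem.List.pyGet? (k₀ :: rest) 0).getD "" then
            "- " ++ (PySem.List.pyGet? (PySem.List.sorted ((pvDictA versions).getD k₀ []) (fun x => x) true) 0).getD "" ++ ", " ++ k₀ ++ ", latest\n"
          else
            c ++ ("- " ++ (PySem.List.pyGet? (PySem.List.sorted ((pvDictA versions).getD k₀ []) (fun x => x) true) 0).getD "" ++ ", " ++ k₀ ++ "\n")) =
          pvChunk versions true k₀ := by
      intro c
      rw [pv_string_fold_if, pv_pyGet?_cons_zero]
      simp [pv_dict_getD, pvChunk, pvGroup, pv_lat, String.append_assoc]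
    -- the remaining iterations append plain chunks
    have hrest : ∀ (l : List String), (∀ k ∈ l, k ≠ k₀) → ∀ c : String,
        l.foldl (fun content mm_ver =>
          ((PySem.List.sorted ((pvDictA versions).getD mm_ver []) (fun x => x) true).drop 1).foldl
            (fun content v => if !(mm_ver == v) then content ++ ("- " ++ v ++ "\n") else content)
            (if mm_ver == (PySem.List.pyGet? (k₀ :: rest) 0).getD "" then
              "- " ++ (PySem.List.pyGet? (PySem.List.sorted ((pvDictA versions).getD mm_ver []) (fun x => x) true) 0).getD "" ++ ", " ++ mm_ver ++ ", latest\n"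
            else
              content ++ ("- " ++ (PySem.List.pyGet? (PySem.List.sorted ((pvDictA versions).getD mm_ver []) (fun x => x) true) 0).getD "" ++ ", " ++ mm_ver ++ "\n"))) c =
          c ++ PySem.Str.join "" (l.map (pvChunk versions false)) := by
      intro l hl
      induction l with
      | nil => intro c; simp [pv_join_empty_nil]
      | cons x xs ih =>
        intro c
        have hx : x ≠ k₀ := hl x (by simp)
        have hcond : (x == (PySem.List.pyGet? (k₀ :: rest) 0).getD "") = false := by
          rw [pv_pyGet?_cons_zero]
          simpa using hx
        rw [List.foldl_cons, hcond]
        simp only [Bool.false_eq_true, if_false]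
        rw [pv_string_fold_if, ih (fun k hk => hl k (by simp [hk]))]
        simp [pv_join_empty_cons, pvChunk, pvGroup, pv_dict_getD, String.append_assoc]
    rw [h0 "", hrest rest (fun k hk h => hk₀ (h ▸ hk))]

-- ---- B side: one stable sort of the pairs by key = the groups in sorted-key order ----

theorem pv_insertBy_nil {α : Type} (bef : α → α → Bool) (x : α) :
    PySem.List.insertBy bef x [] = [x] := rfl

theorem pv_insertBy_cons {α : Type} (bef : α → α → Bool) (x y : α) (ys : List α) :
    PySem.List.insertBy bef x (y :: ys) =
      if bef x y then x :: y :: ys else y :: PySem.List.insertBy bef x ys := rfl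

theorem pv_insertBy_append {α : Type} (bef : α → α → Bool) (x : α) (as bs : List α)
    (h : ∀ a ∈ as, bef x a = false) :
    PySem.List.insertBy bef x (as ++ bs) = as ++ PySem.List.insertBy bef x bs := by
  induction as with
  | nil => simp
  | cons a as ih =>
    rw [List.cons_append, pv_insertBy_cons, h a (by simp), ih (fun a ha => h a (by simp [ha]))]
    simp

theorem pv_insertBy_front {α : Type} (bef : α → α → Bool) (x : α) (l : List α)
    (h : ∀ y ∈ l, bef x y = true) :
    PySem.List.insertBy bef x l = x :: l := by
  cases l with
  | nil => rfl
  | cons y ys => rw [pv_insertBy_cons, h y (by simp)]; simp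

theorem pv_flatMap_congr {α β : Type} (l : List α) (f g : α → List β)
    (h : ∀ a ∈ l, f a = g a) : l.flatMap f = l.flatMap g := by
  induction l with
  | nil => rfl
  | cons a l ih =>
    rw [List.flatMap_cons, List.flatMap_cons, h a (by simp), ih (fun a ha => h a (by simp [ha]))]

-- inserting a pair into a key-grouped list lands at the end of its key's block
theorem pv_insertBy_flatMap (K : List String) (g : String → List (String × String))
    (hsort : K.Pairwise (fun a b => b < a))
    (hkey : ∀ k ∈ K, ∀ p ∈ g k, p.1 = k)
    (hne : ∀ k ∈ K, g k ≠ [])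
    (x : String × String) (hout : x.1 ∉ K → g x.1 = []) :
    PySem.List.insertBy (fun a b => decide (b.1 < a.1)) x (K.flatMap g) =
      (if x.1 ∈ K then K else PySem.List.insertBy (fun a b => decide (b < a)) x.1 K).flatMap
        (fun k => if k = x.1 then g k ++ [x] else g k) := by
  induction K with
  | nil =>
    rw [List.flatMap_nil, pv_insertBy_nil, if_neg (by simp), pv_insertBy_nil,
      List.flatMap_cons, List.flatMap_nil, if_pos rfl, hout (by simp)]
    rfl
  | cons j K₂ ih =>
    have hklt : ∀ k ∈ K₂, k < j := fun k hk => (List.pairwise_cons.mp hsort).1 k hk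
    have hmem1 : ∀ p ∈ g j, p.1 = j := hkey j (by simp)
    have hmemflat : ∀ y ∈ K₂.flatMap g, ∃ k ∈ K₂, y.1 = k := by
      intro y hy
      obtain ⟨k, hk, hyk⟩ := List.mem_flatMap.mp hy
      exact ⟨k, hk, hkey k (by simp [hk]) y hyk⟩
    by_cases hej : x.1 = j
    · -- x belongs to the first block: it is appended right after it
      have h1 : ∀ a ∈ g j, (fun a b => decide (b.1 < a.1)) x a = false := by
        intro a ha; simp [hmem1 a ha, hej]
      have h2 : ∀ y ∈ K₂.flatMap g, (fun a b => decide (b.1 < a.1)) x y = true := by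
        intro y hy
        obtain ⟨k, hk, hyk⟩ := hmemflat y hy
        simp [hyk, hej, hklt k hk]
      rw [List.flatMap_cons, pv_insertBy_append _ _ _ _ h1, pv_insertBy_front _ _ _ h2,
        if_pos (by simp [hej]), List.flatMap_cons, if_pos hej.symm,
        pv_flatMap_congr K₂ _ g (fun k hk => if_neg (by rw [hej]; exact (ne_of_lt (hklt k hk))))]
      simp
    · by_cases hjx : j < x.1
      · -- x's key precedes every listed key: x goes to the very front
        have h2 : ∀ y ∈ (j :: K₂).flatMap g, (fun a b => decide (b.1 < a.1)) x y = true := by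
          intro y hy
          rw [List.flatMap_cons, List.mem_append] at hy
          rcases hy with hy | hy
          · simp [hmem1 y hy, hjx]
          · obtain ⟨k, hk, hyk⟩ := hmemflat y hy
            simp [hyk, lt_trans (hklt k hk) hjx]
        have hxmem : x.1 ∉ j :: K₂ := by
          intro hmem
          rcases List.mem_cons.mp hmem with h | h
          · exact hej h
          · exact absurd (hklt _ h) (lt_asymm hjx)
        rw [pv_insertBy_front _ _ _ h2, if_neg hxmem, pv_insertBy_cons,
          if_pos (show (decide (j < x.1)) = true by simp [hjx])]
        simp only [List.flatMap_cons]
        rw [if_pos trivial, hout hxmem, if_neg (fun hh : j = x.1 => hej hh.symm),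
          pv_flatMap_congr K₂ _ g (fun k hk => if_neg (ne_of_lt (lt_trans (hklt k hk) hjx)))]
        simp
      · -- x's key comes after j: skip j's block and recurse
        have hxj : x.1 < j := lt_of_le_of_ne (not_lt.mp hjx) hej
        have h1 : ∀ a ∈ g j, (fun a b => decide (b.1 < a.1)) x a = false := by
          intro a ha; simp [hmem1 a ha, not_lt_of_gt hxj]
        have ih' := ih (List.pairwise_cons.mp hsort).2 (fun k hk => hkey k (by simp [hk]))
          (fun k hk => hne k (by simp [hk]))
          (fun hx => hout (by simp [hx, hej]))
        rw [List.flatMap_cons, pv_insertBy_append _ _ _ _ h1, ih']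
        by_cases hxin : x.1 ∈ K₂
        · rw [if_pos hxin, if_pos (by simp [hxin]), List.flatMap_cons,
            if_neg (fun h : j = x.1 => hej h.symm)]
        · rw [if_neg hxin, if_neg (by simp [hej, hxin]), pv_insertBy_cons]
          rw [if_neg (show ¬ (decide (j < x.1)) = true by simp [lt_asymm hxj]), List.flatMap_cons,
            if_neg (fun h : j = x.1 => hej h.symm)]

-- the stable reverse sort of the (key, version) pairs by key, grouped explicitly:
-- it is the concatenation, over the distinct keys in reverse-sorted order, of the
-- pairs of each key in their original relative order

theorem pv_sorted_snoc (S : List String) (y : String) :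
    PySem.List.sorted (S ++ [y]) (fun x : String => x) true =
      PySem.List.insertBy (fun a b => decide (b < a)) y
        (PySem.List.sorted S (fun x : String => x) true) := by
  rw [PySem.List.sorted_rev_eq_foldl_insertBy, PySem.List.sorted_rev_eq_foldl_insertBy,
    List.foldl_append, List.foldl_cons, List.foldl_nil]

-- the stable reverse sort of the (key, version) pairs by key, written as the
-- concatenation, over the distinct keys in reverse-sorted order, of each key's
-- pairs in their original relative order
theorem pv_sorted_pairs_flat (versions : List String) :
    PySem.List.sorted (versions.map (fun v => (pvMM v, v))) (fun p => p.1) true =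
      (PySem.List.sorted (PySem.Set.ofList (versions.map pvMM)) (fun x => x) true).flatMap
        (fun k => (versions.map (fun v => (pvMM v, v))).filter (fun p => p.1 == k)) := by
  induction versions using List.reverseRecOn with
  | nil => simp [PySem.List.sorted]
  | append_singleton l v ih =>
    have hnd : (PySem.List.sorted (PySem.Set.ofList (l.map pvMM)) (fun x : String => x) true).Nodup :=
      (PySem.List.sorted_perm (PySem.Set.ofList (l.map pvMM)) (fun x : String => x) true).nodup_iff.mpr
        (PySem.Set.nodup_ofList _)
    have hsort : (PySem.List.sorted (PySem.Set.ofList (l.map pvMM)) (fun x : String => x) true).Pairwise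
        (fun a b => b < a) := by
      have h1 := PySem.List.sorted_pairwise_rev (PySem.Set.ofList (l.map pvMM)) (fun x : String => x)
      exact (h1.and hnd).imp (fun h => lt_of_le_of_ne h.1 (Ne.symm h.2))
    have hkey : ∀ k ∈ PySem.List.sorted (PySem.Set.ofList (l.map pvMM)) (fun x : String => x) true,
        ∀ p ∈ (l.map (fun v => (pvMM v, v))).filter (fun p => p.1 == k), p.1 = k := by
      intro k _ p hp
      simpa using (List.mem_filter.mp hp).2
    have hne : ∀ k ∈ PySem.List.sorted (PySem.Set.ofList (l.map pvMM)) (fun x : String => x) true,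
        (l.map (fun v => (pvMM v, v))).filter (fun p => p.1 == k) ≠ [] := by
      intro k hk hemp
      have hkS : k ∈ l.map pvMM := (PySem.Set.mem_ofList _ _).mp ((PySem.List.mem_sorted _ _ _ _).mp hk)
      obtain ⟨w, hw, hwk⟩ := List.mem_map.mp hkS
      have : (pvMM w, w) ∈ (l.map (fun v => (pvMM v, v))).filter (fun p => p.1 == k) := by
        refine List.mem_filter.mpr ⟨List.mem_map.mpr ⟨w, hw, rfl⟩, by simp [hwk]⟩
      simp [hemp] at this
    have hout : pvMM v ∉ PySem.List.sorted (PySem.Set.ofList (l.map pvMM)) (fun x : String => x) true →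
        (l.map (fun v' => (pvMM v', v'))).filter (fun p => p.1 == pvMM v) = [] := by
      intro hvk
      have hvS : pvMM v ∉ l.map pvMM := fun h =>
        hvk ((PySem.List.mem_sorted _ _ _ _).mpr ((PySem.Set.mem_ofList _ _).mpr h))
      refine List.filter_eq_nil_iff.mpr ?_
      intro p hp hpk
      obtain ⟨w, hw, rfl⟩ := List.mem_map.mp hp
      have hww : pvMM w = pvMM v := by simpa using hpk
      exact hvS (hww ▸ List.mem_map.mpr ⟨w, hw, rfl⟩)
    have hgrp : ∀ k, (List.map (fun v' => (pvMM v', v')) l ++ [(pvMM v, v)]).filter (fun p => p.1 == k) =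
        if k = pvMM v then (l.map (fun v' => (pvMM v', v'))).filter (fun p => p.1 == k) ++ [(pvMM v, v)]
        else (l.map (fun v' => (pvMM v', v'))).filter (fun p => p.1 == k) := by
      intro k
      rw [List.filter_append]
      by_cases hk : k = pvMM v
      · simp [hk]
      · have hk' : ¬pvMM v = k := fun h => hk h.symm
        simp [hk, hk']
    rw [List.map_append, List.map_singleton, PySem.List.sorted_rev_eq_foldl_insertBy,
      List.foldl_append, List.foldl_cons, List.foldl_nil, ← PySem.List.sorted_rev_eq_foldl_insertBy, ih]
    rw [pv_insertBy_flatMap _ _ hsort hkey hne (pvMM v, v) hout]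
    rw [show (l ++ [v]).map pvMM = l.map pvMM ++ [pvMM v] by simp]
    rw [PySem.Set.ofList_append_singleton]
    by_cases hmem : pvMM v ∈ PySem.List.sorted (PySem.Set.ofList (l.map pvMM)) (fun x : String => x) true
    · have hS : pvMM v ∈ PySem.Set.ofList (l.map pvMM) := (PySem.List.mem_sorted _ _ _ _).mp hmem
      rw [if_pos hmem, PySem.Set.add_of_mem hS]
      refine pv_flatMap_congr _ _ _ (fun k _ => ?_)
      simp [hgrp]
    · have hS : pvMM v ∉ PySem.Set.ofList (l.map pvMM) := fun h =>
        hmem ((PySem.List.mem_sorted _ _ _ _).mpr h)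
      rw [if_neg hmem, PySem.Set.add_of_not_mem hS, pv_sorted_snoc]
      refine pv_flatMap_congr _ _ _ (fun k _ => ?_)
      simp [hgrp]

-- collecting runs: a tail of pairs that all carry the current key is appended to the last run
theorem pv_runs_extend (k : String) (qs : List (String × String)) (hq : ∀ p ∈ qs, p.1 = k) :
    ∀ (acc : List (String × List String)) (vs : List String),
    qs.foldl (fun runs kv =>
      match runs.getLast? with
      | some last =>
        if last.1 == kv.1 then runs.dropLast ++ [(last.1, last.2 ++ [kv.2])]
        else runs ++ [(kv.1, [kv.2])]
      | none => [(kv.1, [kv.2])]) (acc ++ [(k, vs)]) = acc ++ [(k, vs ++ qs.map (fun p => p.2))] := by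
  induction qs with
  | nil => intro acc vs; simp
  | cons q qs ih =>
    intro acc vs
    rw [List.foldl_cons]
    have hq1 : q.1 = k := hq q (by simp)
    have : (match (acc ++ [(k, vs)]).getLast? with
        | some last =>
          if last.1 == q.1 then (acc ++ [(k, vs)]).dropLast ++ [(last.1, last.2 ++ [q.2])]
          else (acc ++ [(k, vs)]) ++ [(q.1, [q.2])]
        | none => [(q.1, [q.2])]) = acc ++ [(k, vs ++ [q.2])] := by
      rw [List.getLast?_concat]
      simp [hq1]
    rw [this, ih (fun p hp => hq p (by simp [hp])) acc (vs ++ [q.2])]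
    simp
theorem pv_runs_flat : ∀ (K : List String) (g : String → List (String × String)),
    K.Nodup → (∀ k ∈ K, ∀ p ∈ g k, p.1 = k) → (∀ k ∈ K, g k ≠ []) →
    ∀ (acc : List (String × List String)), (∀ r ∈ acc.getLast?, r.1 ∉ K) →
    (K.flatMap g).foldl (fun runs kv =>
      match runs.getLast? with
      | some last =>
        if last.1 == kv.1 then runs.dropLast ++ [(last.1, last.2 ++ [kv.2])]
        else runs ++ [(kv.1, [kv.2])]
      | none => [(kv.1, [kv.2])]) acc = acc ++ K.map (fun k => (k, (g k).map (fun p => p.2))) := by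
  intro K
  induction K with
  | nil => intro g _ _ _ acc _; simp
  | cons k K₂ ih =>
    intro g hnd hkey hne acc hacc
    rw [List.flatMap_cons, List.foldl_append]
    cases hgk : g k with
    | nil => exact absurd hgk (hne k (by simp))
    | cons q qs =>
      have hq1 : q.1 = k := hkey k (by simp) q (by rw [hgk]; simp)
      have hstep : (match acc.getLast? with
          | some last =>
            if last.1 == q.1 then acc.dropLast ++ [(last.1, last.2 ++ [q.2])]
            else acc ++ [(q.1, [q.2])]
          | none => [(q.1, [q.2])]) = acc ++ [(k, [q.2])] := by
        cases hlast : acc.getLast? with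
        | none =>
          rw [List.getLast?_eq_none_iff.mp hlast]
          simp [hq1]
        | some r =>
          have hr : r.1 ∉ k :: K₂ := hacc r (by rw [hlast]; simp)
          have hfalse : (r.1 == q.1) = false := by
            simp only [beq_eq_false_iff_ne, ne_eq, hq1]
            exact fun h => hr (by simp [h])
          have hfk : (r.1 == k) = false := hq1 ▸ hfalse
          simp only [hq1, hfk, Bool.false_eq_true, if_false]
      rw [List.foldl_cons, hstep,
        pv_runs_extend k qs (fun p hp => hkey k (by simp) p (by rw [hgk]; simp [hp])) acc [q.2]]
      have hlastk : ∀ r ∈ (acc ++ [(k, [q.2] ++ qs.map (fun p => p.2))]).getLast?, r.1 ∉ K₂ := by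
        intro r hr
        rw [List.getLast?_concat] at hr
        simp only [Option.mem_def, Option.some.injEq] at hr
        rw [← hr]
        exact fun h => (List.nodup_cons.mp hnd).1 h
      rw [ih g (List.nodup_cons.mp hnd).2 (fun j hj => hkey j (by simp [hj]))
        (fun j hj => hne j (by simp [hj])) _ hlastk]
      simp [hgk]
theorem pv_B_enumerate_rest (versions : List String) (l : List String) :
    ∀ (s : Int), 1 ≤ s → ∀ out : String,
    (PySem.List.enumerate (l.map (fun k => (k, versions.filter (fun v => pvMM v == k)))) s).foldl
      (fun out ir =>
        (out ++ ("- " ++ (PySem.List.pyGet? (PySem.List.sorted ir.2.2 (fun x => x) true) 0).getD "" ++ ", " ++ ir.2.1 ++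
          (if ir.1 == 0 then ", latest" else "") ++ "\n")) ++
        PySem.Str.join ""
          ((((PySem.List.sorted ir.2.2 (fun x => x) true).drop 1).filter (fun v => v != ir.2.1)).map (fun v => "- " ++ v ++ "\n"))) out =
      out ++ PySem.Str.join "" (l.map (pvChunk versions false)) := by
  induction l with
  | nil => intro s hs out; simp [pv_join_empty_nil]
  | cons x xs ih =>
    intro s hs out
    have hcond : (s == 0) = false := by
      simp only [beq_eq_false_iff_ne, ne_eq]
      omega
    rw [List.map_cons, PySem.List.enumerate_cons, List.foldl_cons]
    rw [ih (s + 1) (by omega)]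
    simp [hcond, pv_join_empty_cons, pvChunk, pvGroup, String.append_assoc]

theorem pv_B_eq_render (versions : List String) : generate_tag_alt versions = pvRender versions := by
  unfold generate_tag_alt pvRender pvRuns
  rw [pv_sorted_pairs_flat]
  have hnd : (PySem.List.sorted (PySem.Set.ofList (versions.map pvMM)) (fun x : String => x) true).Nodup :=
    (PySem.List.sorted_perm (PySem.Set.ofList (versions.map pvMM)) (fun x : String => x) true).nodup_iff.mpr
      (PySem.Set.nodup_ofList _)
  rw [pv_runs_flat _ _ hnd
    (fun k _ p hp => by simpa using (List.mem_filter.mp hp).2)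
    (fun k hk hemp => by
      have hkS : k ∈ versions.map pvMM :=
        (PySem.Set.mem_ofList _ _).mp ((PySem.List.mem_sorted _ _ _ _).mp hk)
      obtain ⟨w, hw, hwk⟩ := List.mem_map.mp hkS
      have : (pvMM w, w) ∈ (versions.map (fun v => (pvMM v, v))).filter (fun p => p.1 == k) :=
        List.mem_filter.mpr ⟨List.mem_map.mpr ⟨w, hw, rfl⟩, by simp [hwk]⟩
      simp [hemp] at this)
    [] (by simp)]
  have hgv : ∀ k : String,
      ((versions.map (fun v => (pvMM v, v))).filter (fun p => p.1 == k)).map (fun p => p.2) =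
        versions.filter (fun v => pvMM v == k) := by
    intro k
    rw [List.filter_map, List.map_map]
    simp [Function.comp_def]
  simp only [hgv, List.nil_append]
  cases hK : PySem.List.sorted (PySem.Set.ofList (versions.map pvMM)) (fun x => x) true with
  | nil => simp
  | cons k₀ rest =>
    rw [List.map_cons, PySem.List.enumerate_cons, List.foldl_cons]
    rw [pv_B_enumerate_rest versions rest (0 + 1) (by omega)]
    simp [pvChunk, pvGroup, pv_lat, String.append_assoc]

-- ===== VERDICT (by name: the statement is the Claim_ definition above) =====
theorem generate_tag_spec : Claim_equal_generate_tag := by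
  intro versions _
  unfold Spec_generate_tag
  rw [pv_A_eq_render, pv_B_eq_render]
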